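-- pv_equiv track=rewrite | github.com/Quantakavin/imcprosperity | manual/round_1/round_1.py | find_clearing_price_and_volume
-- ===== SOURCE A (Python) =====
-- def cumulative_bid_volume(book, price):
--     """Volume willing to buy at or above this price."""
--     return sum(v for p, v in book.items() if p >= price)
--
-- def cumulative_ask_volume(book, price):
--     """Volume willing to sell at or below this price."""
--     return sum(v for p, v in book.items() if p <= price)
--
-- def clearing_candidates(bids_book, asks_book):
--     """All candidate prices visible in the combined book."""
--     prices = sorted(set(bids_book.keys()) | set(asks_book.keys()))
--     return prices
--
-- def find_clearing_price_and_volume(bids_book, asks_book):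
--     """
--     Choose the clearing price as the price that maximizes matched volume:
--         matched_volume(price) = min(cum_bids(price), cum_asks(price))
--
--     If there are ties, choose the lowest tied price.
--     You can change the tie-break if the auction uses a different rule.
--     """
--     best_price = None
--     best_matched = -1
--
--     for price in clearing_candidates(bids_book, asks_book):
--         demand = cumulative_bid_volume(bids_book, price)
--         supply = cumulative_ask_volume(asks_book, price)
--         matched = min(demand, supply)
--
--         if matched > best_matched:
--             best_matched = matched
--             best_price = price
--         elif matched == best_matched and best_price is not None and price < best_price:
--             best_price = price
--
--     return best_price, best_matched
-- ===== SOURCE B (Python) =====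
-- def find_clearing_price_and_volume(bids_book, asks_book):
--     """
--     One sorted sweep with prefix/suffix sums instead of recomputing
--     cumulative volumes per candidate price (O(n log n) vs O(n^2)).
--     """
--     prices = sorted(set(bids_book) | set(asks_book))
--     # suffix sweep: demand_at[p] = total bid volume at price >= p
--     demand_at = {}
--     run = 0
--     for p in reversed(prices):
--         run += bids_book.get(p, 0)
--         demand_at[p] = run
--     # forward sweep: running supply = total ask volume at price <= p
--     best_price, best_matched = None, -1
--     supply = 0
--     for p in prices:
--         supply += asks_book.get(p, 0)
--         matched = min(demand_at[p], supply)
--         if matched > best_matched: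
--             best_matched = matched
--             best_price = p
--     return best_price, best_matched
-- ===== Notes on version B (the rewrite author's own statement) =====
-- stated objective: faster
-- what changed: Replaces A's per-candidate rescans of both books (cumulative_bid/ask_volume for every candidate price) with a single reversed suffix-sum sweep building a demand dict plus one forward sweep carrying a running supply sum over the sorted candidate prices.
import Mathlib
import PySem

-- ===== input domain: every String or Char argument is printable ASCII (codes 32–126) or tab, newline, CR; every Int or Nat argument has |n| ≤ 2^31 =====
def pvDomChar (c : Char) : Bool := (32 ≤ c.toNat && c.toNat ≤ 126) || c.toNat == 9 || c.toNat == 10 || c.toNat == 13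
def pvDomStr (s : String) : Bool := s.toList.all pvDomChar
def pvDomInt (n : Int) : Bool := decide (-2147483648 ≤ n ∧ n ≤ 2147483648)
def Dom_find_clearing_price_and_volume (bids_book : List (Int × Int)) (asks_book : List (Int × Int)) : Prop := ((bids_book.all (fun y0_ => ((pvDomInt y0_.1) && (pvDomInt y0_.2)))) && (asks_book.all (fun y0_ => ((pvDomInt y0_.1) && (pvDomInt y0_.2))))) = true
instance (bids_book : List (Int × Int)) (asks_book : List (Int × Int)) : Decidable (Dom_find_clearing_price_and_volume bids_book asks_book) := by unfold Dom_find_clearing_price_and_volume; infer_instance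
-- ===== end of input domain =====

-- B replaces A's per-candidate O(n) cumulative-volume rescans by one suffix sweep
-- (a prefix-sum dict for demand) and one forward sweep (a running supply sum).

-- ===== PORT A =====
-- sum(v for p, v in book.items() if p >= price)
def cumulative_bid_volume (book : PySem.Dict Int Int) (price : Int) : Int :=
  ((book.items.filter (fun pv => decide (price ≤ pv.1))).map (fun pv => pv.2)).sum

-- sum(v for p, v in book.items() if p <= price)
def cumulative_ask_volume (book : PySem.Dict Int Int) (price : Int) : Int :=
  ((book.items.filter (fun pv => decide (pv.1 ≤ price))).map (fun pv => pv.2)).sum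

-- sorted(set(bids_book.keys()) | set(asks_book.keys()))
def clearing_candidates (bids_book asks_book : PySem.Dict Int Int) : List Int :=
  PySem.List.sorted ((PySem.Set.ofList bids_book.keys).union (PySem.Set.ofList asks_book.keys)) (fun x => x) false

def find_clearing_price_and_volume (bids_book : List (Int × Int)) (asks_book : List (Int × Int)) : Option Int × Int :=
  let bids := PySem.Dict.ofList bids_book
  let asks := PySem.Dict.ofList asks_book
  (clearing_candidates bids asks).foldl
    (fun st price =>
      let demand := cumulative_bid_volume bids price
      let supply := cumulative_ask_volume asks price
      let matched := min demand supply
      if matched > st.2 then (some price, matched)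
      else if matched == st.2 && (match st.1 with | some bp => decide (price < bp) | none => false) then
        (some price, st.2)
      else st)
    (none, -1)

-- ===== PORT B =====
def find_clearing_price_and_volume_alt (bids_book : List (Int × Int)) (asks_book : List (Int × Int)) : Option Int × Int :=
  let bids := PySem.Dict.ofList bids_book
  let asks := PySem.Dict.ofList asks_book
  let prices := PySem.List.sorted ((PySem.Set.ofList bids.keys).union (PySem.Set.ofList asks.keys)) (fun x => x) false
  -- for p in reversed(prices): run += bids_book.get(p, 0); demand_at[p] = run
  let demand_at := (prices.reverse.foldl
      (fun (st : PySem.Dict Int Int × Int) p =>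
        let run := st.2 + bids.getD p 0
        (st.1.insert p run, run))
      (PySem.Dict.empty, 0)).1
  -- for p in prices: supply += asks_book.get(p, 0); …
  -- demand_at[p] ported as getD _ 0: every p of prices was inserted by the first sweep
  let st := prices.foldl
      (fun (st : (Option Int × Int) × Int) p =>
        let supply := st.2 + asks.getD p 0
        let matched := min (demand_at.getD p 0) supply
        if matched > st.1.2 then ((some p, matched), supply) else (st.1, supply))
      ((none, -1), 0)
  st.1

-- ===== PRECONDITION & SPEC =====
def Spec_find_clearing_price_and_volume (bids_book : List (Int × Int)) (asks_book : List (Int × Int)) (out : Option Int × Int) : Prop := out = find_clearing_price_and_volume_alt bids_book asks_book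
instance (bids_book : List (Int × Int)) (asks_book : List (Int × Int)) (out : Option Int × Int) : Decidable (Spec_find_clearing_price_and_volume bids_book asks_book out) := by unfold Spec_find_clearing_price_and_volume; infer_instance

-- ===== CLAIM (what is proved, stated in full; the proofs are below) =====
def Claim_equal_find_clearing_price_and_volume : Prop := ∀ (bids_book : List (Int × Int)) (asks_book : List (Int × Int)), Dom_find_clearing_price_and_volume bids_book asks_book → Spec_find_clearing_price_and_volume bids_book asks_book (find_clearing_price_and_volume bids_book asks_book)

-- ===== LEMMAS AND PROOFS =====

-- the common abstract loop: scan candidates, keep the first maximizer of m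
def pvStepM (m : Int → Int) (st : Option Int × Int) (p : Int) : Option Int × Int :=
  if m p > st.2 then (some p, m p) else st

-- A's loop: on a strictly increasing candidate list the tie-break branch is dead
lemma pv_foldA_eq (m : Int → Int) : ∀ (L : List Int) (st0 : Option Int × Int),
    L.Pairwise (· < ·) →
    (st0.1 = none ∨ ∃ q, st0.1 = some q ∧ ∀ p ∈ L, q < p) →
    L.foldl (fun st price =>
        if m price > st.2 then (some price, m price)
        else if m price == st.2 && (match st.1 with | some bp => decide (price < bp) | none => false) then
          (some price, st.2)
        else st) st0
      = L.foldl (pvStepM m) st0 := by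
  intro L
  induction L with
  | nil => intro st0 _ _; rfl
  | cons a t ih =>
    intro st0 hpw hinv
    have hpw' := (List.pairwise_cons.mp hpw)
    simp only [List.foldl_cons]
    by_cases hgt : m a > st0.2
    · rw [if_pos hgt]
      unfold pvStepM
      rw [if_pos hgt]
      exact ih _ hpw'.2 (Or.inr ⟨a, rfl, hpw'.1⟩)
    · rw [if_neg hgt]
      have hdead : (m a == st0.2 && (match st0.1 with | some bp => decide (a < bp) | none => false)) = false := by
        rcases hinv with h | ⟨q, hq, hlt⟩
        · rw [h]; simp
        · rw [hq]
          have hqa : q < a := hlt a (by simp)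
          simp [show ¬ a < q by omega]
      rw [hdead]
      simp only [Bool.false_eq_true, if_false]
      unfold pvStepM
      rw [if_neg hgt]
      apply ih _ hpw'.2
      rcases hinv with h | ⟨q, hq, hlt⟩
      · exact Or.inl h
      · exact Or.inr ⟨q, hq, fun p hp => hlt p (List.mem_cons_of_mem _ hp)⟩

-- B's loop: the running supply accumulator realises m on a strictly increasing list
lemma pv_foldB_eq (dem fa m : Int → Int) : ∀ (L : List Int) (st0 : Option Int × Int) (s0 : Int),
    L.Pairwise (· < ·) →
    (∀ p ∈ L, min (dem p) (s0 + ((L.filter (fun k => decide (k ≤ p))).map fa).sum) = m p) →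
    (L.foldl (fun (st : (Option Int × Int) × Int) p =>
        if min (dem p) (st.2 + fa p) > st.1.2 then ((some p, min (dem p) (st.2 + fa p)), st.2 + fa p)
        else (st.1, st.2 + fa p)) (st0, s0)).1
      = L.foldl (pvStepM m) st0 := by
  intro L
  induction L with
  | nil => intro st0 s0 _ _; rfl
  | cons a t ih =>
    intro st0 s0 hpw hm
    have hpw' := (List.pairwise_cons.mp hpw)
    have hfa : t.filter (fun k => decide (k ≤ a)) = [] := by
      apply List.filter_eq_nil_iff.mpr
      intro k hk
      have := hpw'.1 k hk
      simp; omega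
    have hma : min (dem a) (s0 + fa a) = m a := by
      have h := hm a (by simp)
      rw [List.filter_cons] at h
      simpa [hfa] using h
    simp only [List.foldl_cons]
    rw [hma]
    unfold pvStepM
    by_cases hgt : m a > st0.2
    · rw [if_pos hgt, if_pos hgt]
      apply ih _ _ hpw'.2
      intro p hp
      have h1 := hm p (List.mem_cons_of_mem _ hp)
      rw [List.filter_cons] at h1
      have hap : a ≤ p := le_of_lt (hpw'.1 p hp)
      simp only [decide_eq_true_eq] at h1 ⊢
      rw [if_pos (by simpa using hap)] at h1
      simp only [List.map_cons, List.sum_cons] at h1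
      rw [← h1]; ring_nf
    · rw [if_neg hgt, if_neg hgt]
      apply ih _ _ hpw'.2
      intro p hp
      have h1 := hm p (List.mem_cons_of_mem _ hp)
      rw [List.filter_cons] at h1
      have hap : a ≤ p := le_of_lt (hpw'.1 p hp)
      rw [if_pos (by simpa using hap)] at h1
      simp only [List.map_cons, List.sum_cons] at h1
      rw [← h1]; ring_nf

-- the suffix sweep: after folding over a strictly decreasing list, the dict holds suffix sums
lemma pv_suffix_fold (f : Int → Int) : ∀ (L : List Int) (d0 : PySem.Dict Int Int) (r0 : Int),
    L.Pairwise (· > ·) →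
    ∀ p, ((L.foldl (fun (st : PySem.Dict Int Int × Int) p => (st.1.insert p (st.2 + f p), st.2 + f p)) (d0, r0)).1).getD p 0
      = if p ∈ L then r0 + ((L.filter (fun k => decide (p ≤ k))).map f).sum
        else d0.getD p 0 := by
  intro L
  induction L with
  | nil => intro d0 r0 _ p; simp
  | cons a t ih =>
    intro d0 r0 hpw p
    have hpw' := (List.pairwise_cons.mp hpw)
    simp only [List.foldl_cons]
    rw [ih _ _ hpw'.2 p]
    by_cases hpt : p ∈ t
    · have hap : p < a := hpw'.1 p hpt
      rw [if_pos hpt, if_pos (by simp [hpt])]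
      rw [List.filter_cons, if_pos (by simp; omega)]
      simp only [List.map_cons, List.sum_cons]
      ring
    · rw [if_neg hpt]
      by_cases hpa : p = a
      · subst hpa
        rw [if_pos (by simp), PySem.Dict.getD_insert]
        rw [if_pos rfl]
        have hft : t.filter (fun k => decide (p ≤ k)) = [] := by
          apply List.filter_eq_nil_iff.mpr
          intro k hk
          have := hpw'.1 k hk
          simp; omega
        rw [List.filter_cons, if_pos (by simp)]
        simp [hft]
      · rw [if_neg (by simp [hpa, hpt]), PySem.Dict.getD_insert, if_neg hpa]

-- summing getD over the filtered candidate list equals A's filtered item sum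
lemma pv_sum_getD_filter (d : PySem.Dict Int Int) (P : List Int) (q : Int → Bool)
    (hPnd : P.Nodup) (hdnd : d.keys.Nodup) (hsub : ∀ k ∈ d.keys, k ∈ P) :
    ((P.filter q).map (fun k => d.getD k 0)).sum
      = ((d.items.filter (fun pv => q pv.1)).map (fun pv => pv.2)).sum := by
  have h1 := List.sum_toFinset (fun k => d.getD k 0) (hPnd.filter q)
  have h2 := List.sum_toFinset (fun k => d.getD k 0) (hdnd.filter q)
  have hfin : ∑ x ∈ (d.keys.filter q).toFinset, d.getD x 0
      = ∑ x ∈ (P.filter q).toFinset, d.getD x 0 := by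
    apply Finset.sum_subset
    · intro x hx
      simp only [List.mem_toFinset, List.mem_filter] at hx ⊢
      exact ⟨hsub x hx.1, hx.2⟩
    · intro x hx hnx
      simp only [List.mem_toFinset, List.mem_filter] at hx hnx
      have hxk : x ∉ d.keys := fun h => hnx ⟨h, hx.2⟩
      have := (PySem.Dict.get?_eq_none_iff_not_mem_keys d x).mpr hxk
      simp [PySem.Dict.getD, this]
  rw [← h1, ← hfin, h2]
  -- keys side equals items side
  · have hk : d.keys.filter q = (d.items.filter (fun pv => q pv.1)).map (fun pv => pv.1) := by
      show (d.items.map (fun pv => pv.1)).filter q = _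
      rw [List.filter_map]
      rfl
    rw [hk, List.map_map]
    congr 1
    apply List.map_congr_left
    intro pv hpv
    have hmem : pv ∈ d.items := List.mem_of_mem_filter hpv
    have := PySem.Dict.get?_of_mem_items d (k := pv.1) (v := pv.2) (by simpa using hmem) hdnd
    simp [Function.comp, PySem.Dict.getD, this]

-- strict increase of the sorted candidate list
lemma pv_pairwise_lt_of_nodup_sorted (U : List Int) (hnd : U.Nodup) :
    (PySem.List.sorted U (fun x => x) false).Pairwise (· < ·) := by
  have hle := PySem.List.sorted_pairwise U (fun x => x)
  have hperm := PySem.List.sorted_perm U (fun x => x) false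
  have hnd' : (PySem.List.sorted U (fun x => x) false).Nodup := hperm.nodup_iff.mpr hnd
  have := hnd'.and hle
  exact this.imp (fun h => lt_of_le_of_ne h.2 h.1)

-- ===== VERDICT (by name: the statement is the Claim_ definition above) =====
theorem find_clearing_price_and_volume_spec : Claim_equal_find_clearing_price_and_volume := by
  intro bids_book asks_book _dom
  unfold Spec_find_clearing_price_and_volume
  unfold find_clearing_price_and_volume find_clearing_price_and_volume_alt clearing_candidates
  set bids := PySem.Dict.ofList bids_book with hbids
  set asks := PySem.Dict.ofList asks_book with hasks
  set U : List Int := (PySem.Set.ofList bids.keys).union (PySem.Set.ofList asks.keys) with hU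
  set P : List Int := PySem.List.sorted U (fun x => x) false with hP
  -- facts about P
  have hUnd : U.Nodup := PySem.Set.nodup_union _ _ (PySem.Set.nodup_ofList _)
  have hlt : P.Pairwise (· < ·) := pv_pairwise_lt_of_nodup_sorted U hUnd
  have hPnd : P.Nodup := hlt.imp ne_of_lt
  have hsubb : ∀ k ∈ bids.keys, k ∈ P := by
    intro k hk
    rw [hP, PySem.List.mem_sorted, hU, PySem.Set.mem_union]
    exact Or.inl ((PySem.Set.mem_ofList _ _).mpr hk)
  have hsuba : ∀ k ∈ asks.keys, k ∈ P := by
    intro k hk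
    rw [hP, PySem.List.mem_sorted, hU, PySem.Set.mem_union]
    exact Or.inr ((PySem.Set.mem_ofList _ _).mpr hk)
  -- the common per-price matched volume
  set m : Int → Int := fun p => min (cumulative_bid_volume bids p) (cumulative_ask_volume asks p) with hm
  -- A's side
  rw [pv_foldA_eq m P (none, -1) hlt (Or.inl rfl)]
  -- B's side: name the demand dict
  set demand_at := (P.reverse.foldl (fun (st : PySem.Dict Int Int × Int) p => (st.1.insert p (st.2 + bids.getD p 0), st.2 + bids.getD p 0)) (PySem.Dict.empty, 0)).1 with hD
  have hdem : ∀ p ∈ P, demand_at.getD p 0 = ((P.filter (fun k => decide (p ≤ k))).map (fun k => bids.getD k 0)).sum := by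
    intro p hp
    rw [hD, pv_suffix_fold (fun p => bids.getD p 0) P.reverse _ _ (List.pairwise_reverse.mpr hlt) p]
    rw [if_pos (List.mem_reverse.mpr hp)]
    rw [List.filter_reverse, List.map_reverse, List.sum_reverse]
    ring
  rw [pv_foldB_eq (fun p => demand_at.getD p 0) (fun p => asks.getD p 0) m P (none, -1) 0 hlt]
  intro p hp
  rw [hdem p hp]
  rw [pv_sum_getD_filter bids P (fun k => decide (p ≤ k)) hPnd (PySem.Dict.nodup_keys_ofList _) hsubb]
  rw [pv_sum_getD_filter asks P (fun k => decide (k ≤ p)) hPnd (PySem.Dict.nodup_keys_ofList _) hsuba]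
  rw [hm]
  simp only [zero_add]
  rfl
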